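-- pv_equiv track=rewrite | github.com/TheDr1ver/ledhntr-suite-public | ledhntr/ledhntr/plugins/hntr.py | scrub_junk
-- ===== SOURCE A (Python) =====
-- from typing import Dict, Optional
-- from typing import (
--     Any,
--     Dict,
--     List,
--     Optional,
--     Tuple,
--     Union,
-- )
--
-- def scrub_junk(
--
--     flat_res: Dict = None,
--     ignored_keys: Dict = None,
-- ):
--     """
--     scrub data we literally want nothing to do with
--     """
--
--     '''
--     ignored_keys = {
--         "startswith": [],
--         "endswith": [
--             "perspective_id",
--         ],
--         "equals": [],
--         "contains": [
--             "__"
--         ],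
--         "matches": [
--             <re.compile>,
--         ]
--     }
--     '''
--     bad_keys = []
--     clean_res = {}
--     for longkey, value in flat_res.items():
--         found_long_key = False
--         for ik, iv in ignored_keys.items():
--             if found_long_key:
--                 break
--             if ik == "startswith":
--                 for longkeymatch in iv:
--                     if longkey.startswith(longkeymatch):
--                         bad_keys.append(longkey)
--                         found_long_key = True
--                         break
--             elif ik=="endswith":
--                 for longkeymatch in iv:
--                     if longkey.endswith(longkeymatch):
--                         bad_keys.append(longkey)
--                         found_long_key = True
--                         break
--             elif ik=="equals":
--                 for longkeymatch in iv:
--                     if longkey == longkeymatch: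
--                         bad_keys.append(longkey)
--                         found_long_key = True
--                         break
--             elif ik=="contains":
--                 for longkeymatch in iv:
--                     if longkeymatch in longkey:
--                         bad_keys.append(longkey)
--                         found_long_key = True
--                         break
--     for k, v in flat_res.items():
--         if k not in bad_keys:
--             clean_res[k] = v
--     return clean_res
-- ===== SOURCE B (Python) =====
-- def scrub_junk(
--     flat_res=None,
--     ignored_keys=None,
-- ):
--     """
--     scrub data we literally want nothing to do with
--     """
--     tests = {
--         "startswith": str.startswith,
--         "endswith": str.endswith,
--         "equals": lambda k, p: k == p,
--         "contains": lambda k, p: p in k,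
--     }
--     # rule-major: apply each ignore rule as its own filtering pass over the
--     # (shrinking) result dict, instead of testing every rule per key.
--     remaining = dict(flat_res)
--     for cat, patterns in ignored_keys.items():
--         test = tests.get(cat)
--         if test is None:
--             continue
--         remaining = {
--             k: v for k, v in remaining.items()
--             if not any(test(k, p) for p in patterns)
--         }
--     return remaining
-- ===== Notes on version B (the rewrite author's own statement) =====
-- stated objective: alternative
-- what changed: Inverts the loop nesting: instead of A's key-major two-pass design (per key, walk an if/elif category ladder with a found flag to collect a bad_keys list, then re-scan flat_res filtering by linear list membership), B is rule-major: it applies each ignore rule as its own filtering pass over a shrinking result dict, so no bad_keys list, no O(n) membership scan and no per-key early-exit flag exist.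
import Mathlib
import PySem

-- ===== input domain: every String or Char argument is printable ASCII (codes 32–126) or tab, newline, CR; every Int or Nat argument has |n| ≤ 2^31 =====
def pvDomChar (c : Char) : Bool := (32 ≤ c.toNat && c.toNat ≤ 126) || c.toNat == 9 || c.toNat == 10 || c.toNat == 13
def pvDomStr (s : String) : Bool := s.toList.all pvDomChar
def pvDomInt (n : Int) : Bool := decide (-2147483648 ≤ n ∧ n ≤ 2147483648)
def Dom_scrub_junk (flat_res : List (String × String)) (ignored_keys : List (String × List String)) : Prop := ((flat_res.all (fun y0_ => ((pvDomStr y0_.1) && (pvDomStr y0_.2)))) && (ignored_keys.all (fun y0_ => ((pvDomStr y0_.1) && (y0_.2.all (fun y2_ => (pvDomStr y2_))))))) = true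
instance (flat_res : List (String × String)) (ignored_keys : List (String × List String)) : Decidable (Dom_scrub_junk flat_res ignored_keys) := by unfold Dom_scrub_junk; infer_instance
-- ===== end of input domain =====

-- B inverts the loop nesting: instead of A's key-major two passes (collect a bad_keys list via
-- an if/elif category ladder with a found flag, then re-filter flat_res by list membership),
-- B applies each ignore rule as its own filtering pass over a shrinking result dict.

-- ===== PORT A =====
-- inner `for ik, iv in ignored_keys.items()` loop body, threading (bad_keys, found_long_key);
-- each `for longkeymatch in iv: … break` scan-for-first-match-and-break is ported as `.any`.
def pvCatStep (longkey : String) (st : List String × Bool) (ik : String × List String) :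
    List String × Bool :=
  if st.2 then st
  else if ik.1 == "startswith" then
    (if ik.2.any (fun m => PySem.Str.startswith longkey m) then (st.1 ++ [longkey], true) else st)
  else if ik.1 == "endswith" then
    (if ik.2.any (fun m => PySem.Str.endswith longkey m) then (st.1 ++ [longkey], true) else st)
  else if ik.1 == "equals" then
    (if ik.2.any (fun m => longkey == m) then (st.1 ++ [longkey], true) else st)
  else if ik.1 == "contains" then
    (if ik.2.any (fun m => PySem.Str.isIn m longkey) then (st.1 ++ [longkey], true) else st)
  else st

def scrub_junk (flat_res : List (String × String)) (ignored_keys : List (String × List String)) :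
    List (String × String) :=
  let bad_keys : List String :=
    flat_res.foldl (fun bad kv => (ignored_keys.foldl (pvCatStep kv.1) (bad, false)).1) []
  (flat_res.foldl
      (fun clean kv => if bad_keys.contains kv.1 then clean else clean.insert kv.1 kv.2)
      (PySem.Dict.empty : PySem.Dict String String)).items

-- ===== PORT B =====
-- the `tests` table of Source B
def pvTests : PySem.Dict String (String → String → Bool) :=
  PySem.Dict.ofList
    [("startswith", fun k p => PySem.Str.startswith k p),
     ("endswith", fun k p => PySem.Str.endswith k p),
     ("equals", fun k p => k == p),
     ("contains", fun k p => PySem.Str.isIn p k)]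

-- one iteration of Source B's rule loop: either skip (unknown category) or one filtering pass
-- ({k: v for k, v in remaining.items() if not any(test(k, p) for p in patterns)})
def pvRulePass (remaining : PySem.Dict String String) (ik : String × List String) :
    PySem.Dict String String :=
  match pvTests.get? ik.1 with
  | none => remaining
  | some test =>
      PySem.Dict.ofList
        (remaining.items.filter (fun kv => ! ik.2.any (fun p => test kv.1 p)))

def scrub_junk_alt (flat_res : List (String × String))
    (ignored_keys : List (String × List String)) : List (String × String) :=
  (ignored_keys.foldl pvRulePass (PySem.Dict.ofList flat_res)).items

-- ===== PRECONDITION & SPEC =====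
-- Pre_ restricts flat_res to association lists with distinct keys: flat_res is a Python dict,
-- so every list representing an actual Python input has no duplicate keys.
def Pre_scrub_junk (flat_res : List (String × String)) (ignored_keys : List (String × List String)) : Prop :=
  (flat_res.map (·.1)).Nodup
instance (flat_res : List (String × String)) (ignored_keys : List (String × List String)) : Decidable (Pre_scrub_junk flat_res ignored_keys) := by unfold Pre_scrub_junk; infer_instance

def pvWitness_scrub_junk : (List (String × String)) × (List (String × List String)) :=
  ([("a__b", "1"), ("name", "2"), ("x_perspective_id", "3")],
   [("endswith", ["perspective_id"]), ("contains", ["__"]), ("matches", ["zz"])])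

def Spec_scrub_junk (flat_res : List (String × String)) (ignored_keys : List (String × List String)) (out : List (String × String)) : Prop := out = scrub_junk_alt flat_res ignored_keys
instance (flat_res : List (String × String)) (ignored_keys : List (String × List String)) (out : List (String × String)) : Decidable (Spec_scrub_junk flat_res ignored_keys out) := by unfold Spec_scrub_junk; infer_instance

-- ===== CLAIM (what is proved, stated in full; the proofs are below) =====
def Claim_equal_scrub_junk : Prop := ∀ (flat_res : List (String × String)) (ignored_keys : List (String × List String)), Dom_scrub_junk flat_res ignored_keys → Pre_scrub_junk flat_res ignored_keys → Spec_scrub_junk flat_res ignored_keys (scrub_junk flat_res ignored_keys)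

-- ===== LEMMAS AND PROOFS =====

-- the match predicate of one rule entry, as a plain function (used only by the proofs)
def pvRuleMatch (ik : String × List String) (k : String) : Bool :=
  match pvTests.get? ik.1 with
  | some test => ik.2.any (fun p => test k p)
  | none => false

-- "some rule ignores k" — characterises both programs' removal condition
def pvIsIgnored (iks : List (String × List String)) (k : String) : Bool :=
  iks.any (fun ik => pvRuleMatch ik k)

-- the table has no entry for an unrecognised category
lemma pvTests_none (s : String) (h1 : s ≠ "startswith") (h2 : s ≠ "endswith")
    (h3 : s ≠ "equals") (h4 : s ≠ "contains") : pvTests.get? s = none := by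
  have h : pvTests = PySem.Dict.mk
      [("startswith", fun k p => PySem.Str.startswith k p),
       ("endswith", fun k p => PySem.Str.endswith k p),
       ("equals", fun k p => k == p),
       ("contains", fun k p => PySem.Str.isIn p k)] := by rfl
  rw [h]
  simp only [PySem.Dict.get?_mk_cons, beq_iff_eq, Ne.symm h1, Ne.symm h2, Ne.symm h3,
    Ne.symm h4, if_false]
  rfl

-- B's table lookup computes exactly A's category ladder for one (category, patterns) entry
lemma pvRuleMatch_eq (ik : String × List String) (k : String) :
    pvRuleMatch ik k
    = (if ik.1 == "startswith" then ik.2.any (fun m => PySem.Str.startswith k m)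
       else if ik.1 == "endswith" then ik.2.any (fun m => PySem.Str.endswith k m)
       else if ik.1 == "equals" then ik.2.any (fun m => k == m)
       else if ik.1 == "contains" then ik.2.any (fun m => PySem.Str.isIn m k)
       else false) := by
  unfold pvRuleMatch
  rcases eq_or_ne ik.1 "startswith" with h1 | h1
  · rw [h1]; rfl
  rcases eq_or_ne ik.1 "endswith" with h2 | h2
  · rw [h2]; rfl
  rcases eq_or_ne ik.1 "equals" with h3 | h3
  · rw [h3]; rfl
  rcases eq_or_ne ik.1 "contains" with h4 | h4
  · rw [h4]; rfl
  rw [pvTests_none ik.1 h1 h2 h3 h4]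
  simp [h1, h2, h3, h4]

-- a found flag that is set stops A's inner loop
lemma pvCatStep_true (k : String) (iks : List (String × List String)) (bad : List String) :
    iks.foldl (pvCatStep k) (bad, true) = (bad, true) := by
  induction iks with
  | nil => rfl
  | cons ik rest ih => simpa [pvCatStep] using ih

-- A's inner loop appends k exactly when some rule matches k
lemma pvCatStep_fold (k : String) (iks : List (String × List String)) (bad : List String) :
    iks.foldl (pvCatStep k) (bad, false)
      = (if pvIsIgnored iks k then bad ++ [k] else bad, pvIsIgnored iks k) := by
  induction iks generalizing bad with
  | nil => simp [pvIsIgnored]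
  | cons ik rest ih =>
    have hstep : pvCatStep k (bad, false) ik =
        (if pvRuleMatch ik k then (bad ++ [k], true) else (bad, false)) := by
      rw [pvRuleMatch_eq]
      simp only [pvCatStep]
      split_ifs <;> simp_all
    by_cases hm : pvRuleMatch ik k = true
    · rw [List.foldl_cons, hstep, if_pos hm, pvCatStep_true]
      simp [pvIsIgnored, hm]
    · simp only [Bool.not_eq_true] at hm
      rw [List.foldl_cons, hstep, hm, if_neg (by simp), ih]
      simp only [pvIsIgnored, List.any_cons, hm, Bool.false_or]
      rfl

-- A's bad_keys list is the ignored keys of flat_res, in order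
lemma pvBadKeys (iks : List (String × List String)) (fl : List (String × String))
    (bad : List String) :
    fl.foldl (fun bad kv => (iks.foldl (pvCatStep kv.1) (bad, false)).1) bad
      = bad ++ (fl.filter (fun kv => pvIsIgnored iks kv.1)).map (·.1) := by
  induction fl generalizing bad with
  | nil => simp
  | cons kv rest ih =>
    rw [List.foldl_cons]
    have h1 : (iks.foldl (pvCatStep kv.1) (bad, false)).1
        = if pvIsIgnored iks kv.1 then bad ++ [kv.1] else bad := by
      rw [pvCatStep_fold]
    rw [h1]
    by_cases h : pvIsIgnored iks kv.1 = true
    · rw [if_pos h, ih]; simp [h]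
    · rw [if_neg h, ih]; simp [h]

-- membership in bad_keys coincides with the predicate, for keys drawn from flat_res
lemma pvContains_badKeys (iks : List (String × List String)) (fl : List (String × String))
    (kv : String × String) (hm : kv ∈ fl) :
    ((fl.filter (fun kv => pvIsIgnored iks kv.1)).map (·.1)).contains kv.1
      = pvIsIgnored iks kv.1 := by
  by_cases h : pvIsIgnored iks kv.1 = true
  · rw [h]
    simp only [List.contains_eq_mem, decide_eq_true_eq]
    exact List.mem_map.mpr ⟨kv, List.mem_filter.mpr ⟨hm, h⟩, rfl⟩
  · simp only [Bool.not_eq_true] at h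
    rw [h]
    simp only [List.contains_eq_mem, decide_eq_false_iff_not]
    intro hmem
    obtain ⟨kv', hkv', hk⟩ := List.mem_map.mp hmem
    obtain ⟨-, hig⟩ := List.mem_filter.mp hkv'
    rw [hk] at hig
    simp [h] at hig

-- an insert-fold over pairs with distinct fresh keys just lists the pairs
lemma pvItems_ofList (l : List (String × String)) (hnd : (l.map (·.1)).Nodup) :
    (PySem.Dict.ofList l).items = l := by
  have := PySem.Dict.items_foldl_insert_fresh (d := (PySem.Dict.empty : PySem.Dict String String))
    (l := l) (k := (·.1)) (v := (·.2)) (by simp) hnd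
  simpa using this

-- a filter by a key predicate keeps the keys Nodup
lemma pvNodup_filter (l : List (String × String)) (q : String × String → Bool)
    (hnd : (l.map (·.1)).Nodup) : ((l.filter q).map (·.1)).Nodup :=
  hnd.sublist (List.Sublist.map _ List.filter_sublist)

-- B's rule loop, started on a dict of distinct keys, filters by "no rule matches"
lemma pvRuleFold (iks : List (String × List String)) (l : List (String × String))
    (hnd : (l.map (·.1)).Nodup) :
    (iks.foldl pvRulePass (PySem.Dict.ofList l)).items
      = l.filter (fun kv => ! pvIsIgnored iks kv.1) := by
  induction iks generalizing l with
  | nil =>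
    simp only [List.foldl_nil, pvIsIgnored, List.any_nil, Bool.not_false, List.filter_true]
    exact pvItems_ofList l hnd
  | cons ik rest ih =>
    have hpass : pvRulePass (PySem.Dict.ofList l) ik
        = PySem.Dict.ofList (l.filter (fun kv => ! pvRuleMatch ik kv.1)) := by
      cases hg : pvTests.get? ik.1 with
      | none =>
        simp only [pvRulePass, hg]
        congr 1
        symm
        apply List.filter_eq_self.mpr
        intro kv _
        simp [pvRuleMatch, hg]
      | some test =>
        simp only [pvRulePass, hg, pvItems_ofList l hnd]
        congr 1
        apply List.filter_congr
        intro kv _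
        simp [pvRuleMatch, hg]
    rw [List.foldl_cons, hpass,
      ih (l.filter (fun kv => ! pvRuleMatch ik kv.1)) (pvNodup_filter l _ hnd),
      List.filter_filter]
    apply List.filter_congr
    intro kv _
    simp [pvIsIgnored, Bool.and_comm]

-- ===== VERDICT (by name: the statement is the Claim_ definition above) =====
theorem scrub_junk_spec : Claim_equal_scrub_junk := by
  intro flat_res ignored_keys _ hpre
  unfold Spec_scrub_junk scrub_junk scrub_junk_alt
  rw [pvRuleFold ignored_keys flat_res hpre]
  simp only [pvBadKeys, List.nil_append]
  -- replace the bad_keys membership test by the predicate, then fold insert = filter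
  have hcongr :
      flat_res.foldl
        (fun clean kv =>
          if ((flat_res.filter (fun kv => pvIsIgnored ignored_keys kv.1)).map (·.1)).contains kv.1
          then clean else clean.insert kv.1 kv.2)
        (PySem.Dict.empty : PySem.Dict String String)
      = flat_res.foldl
        (fun clean kv => if pvIsIgnored ignored_keys kv.1 then clean else clean.insert kv.1 kv.2)
        (PySem.Dict.empty : PySem.Dict String String) :=
    PySem.List.foldl_congr_mem _ _ _ _ (fun acc kv hkv => by
      rw [pvContains_badKeys ignored_keys flat_res kv hkv])
  rw [hcongr]
  have hfold :
      flat_res.foldl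
        (fun clean kv => if pvIsIgnored ignored_keys kv.1 then clean else clean.insert kv.1 kv.2)
        (PySem.Dict.empty : PySem.Dict String String)
      = PySem.Dict.ofList (flat_res.filter (fun kv => ! pvIsIgnored ignored_keys kv.1)) := by
    show _ = (flat_res.filter (fun kv => ! pvIsIgnored ignored_keys kv.1)).foldl
        (fun (clean : PySem.Dict String String) kv => clean.insert kv.1 kv.2) PySem.Dict.empty
    rw [List.foldl_filter]
    exact PySem.List.foldl_congr_mem _ _ _ _ (fun acc kv _ => by
      by_cases h : pvIsIgnored ignored_keys kv.1 = true <;> simp [h])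
  rw [hfold,
    pvItems_ofList _ (pvNodup_filter flat_res _ hpre)]
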